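-- pv_equiv track=rewrite | github.com/pchampio/yaker | server/game/score.py | score_in_row
-- ===== SOURCE A (Python) =====
-- def is_Sorted(lst):
--     if len(lst) == 1:
--        return True
--     return lst[0] < lst[1] and is_Sorted(lst[1:])
--
-- def score_in_row(row):
--     row_count = []
--     pts = 0
--     for item in row:
--          row_count.append(row.count(item))
--
--     if row_count.count(2) == 4: # 2 paire
--         pts += 3
--     elif row_count.count(4) == 4: # carre
--         pts += 6
--     elif row_count.count(5) == 5: # 5x
--         pts += 8
--     elif row_count.count(3) == 3 and row_count.count(2) == 2: # full
--         pts += 6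
--     elif row_count.count(3) == 3: # brelan
--         pts += 3
--     elif row_count.count(2) == 2: # paire
--         pts += 1
--     elif row_count.count(1) == 5:
--         if max(row) - min(row) == 4:
--             if  is_Sorted(row) or is_Sorted(row[::-1]):
--                 pts += 12 # suite sorted
--             else:
--                 pts += 8 # suite
--     return pts
-- ===== SOURCE B (Python) =====
-- def score_in_row(row):
--     # histogram of multiplicities: mult[c] = number of distinct values appearing exactly c times
--     counts = {}
--     for x in row:
--         counts[x] = counts.get(x, 0) + 1
--     mult = {}
--     for c in counts.values():
--         mult[c] = mult.get(c, 0) + 1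
--     if mult.get(2, 0) == 2:                              # 2 paire
--         return 3
--     if mult.get(4, 0) == 1:                              # carre
--         return 6
--     if mult.get(5, 0) == 1:                              # 5x
--         return 8
--     if mult.get(3, 0) == 1 and mult.get(2, 0) == 1:      # full
--         return 6
--     if mult.get(3, 0) == 1:                              # brelan
--         return 3
--     if mult.get(2, 0) == 1:                              # paire
--         return 1
--     if mult.get(1, 0) == 5:
--         if max(row) - min(row) == 4:
--             inc = all(a < b for a, b in zip(row, row[1:]))
--             dec = all(a > b for a, b in zip(row, row[1:]))
--             return 12 if inc or dec else 8
--         return 0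
--     return 0
-- ===== Notes on version B (the rewrite author's own statement) =====
-- stated objective: faster
-- what changed: B replaces A's quadratic per-item list of counts (row.count inside a loop, then six list.count scans) by a single-pass counter dict plus a histogram of multiplicities (counts of counts) that each combination test reads with one lookup, and the recursive is_Sorted by pairwise zip scans.
import Mathlib
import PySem

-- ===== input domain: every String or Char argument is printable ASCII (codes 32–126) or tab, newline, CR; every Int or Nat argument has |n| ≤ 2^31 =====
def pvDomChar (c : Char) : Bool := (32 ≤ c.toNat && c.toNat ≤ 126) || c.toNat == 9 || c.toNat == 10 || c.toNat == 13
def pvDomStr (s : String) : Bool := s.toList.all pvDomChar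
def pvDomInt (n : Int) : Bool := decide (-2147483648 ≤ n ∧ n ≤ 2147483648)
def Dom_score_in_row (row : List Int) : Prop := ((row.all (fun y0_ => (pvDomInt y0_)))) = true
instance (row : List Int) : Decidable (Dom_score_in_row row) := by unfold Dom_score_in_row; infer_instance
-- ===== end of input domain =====

-- B replaces A's quadratic per-item count list by a histogram of multiplicities (dict of counts
-- of counts) consulted once per combination test: one pass instead of A's quadratic count loop (objective: faster, measured).

-- ===== PORT A =====
-- is_Sorted: 'if len(lst)==1: return True; return lst[0] < lst[1] and is_Sorted(lst[1:])'.
-- On [] Python raises IndexError; score_in_row never calls it on [] (the branch needs 5 distinct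
-- values), so the [] case here is arbitrary.
def isSortedA : List Int → Bool
  | [] => true
  | [_] => true
  | a :: b :: t => decide (a < b) && isSortedA (b :: t)

def score_in_row (row : List Int) : Int :=
  -- row_count = [row.count(item) for appended item in row]
  let row_count : List Int := row.foldl (fun acc item => acc ++ [((PySem.List.count row item : Nat) : Int)]) []
  let pts : Int := 0
  if PySem.List.count row_count 2 = 4 then pts + 3              -- 2 paire
  else if PySem.List.count row_count 4 = 4 then pts + 6         -- carre
  else if PySem.List.count row_count 5 = 5 then pts + 8         -- 5x
  else if PySem.List.count row_count 3 = 3 ∧ PySem.List.count row_count 2 = 2 then pts + 6  -- full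
  else if PySem.List.count row_count 3 = 3 then pts + 3         -- brelan
  else if PySem.List.count row_count 2 = 2 then pts + 1         -- paire
  else if PySem.List.count row_count 1 = 5 then
    -- max(row)/min(row): row is nonempty here (5 items counted once), so the none case is unreachable
    match PySem.List.max? row (fun y => y), PySem.List.min? row (fun y => y) with
    | some mx, some mn =>
      if mx - mn = 4 then
        -- row[::-1] is row.reverse (exact: a full slice with step -1 reverses the list)
        if isSortedA row || isSortedA row.reverse then pts + 12 else pts + 8
      else pts
    | _, _ => pts
  else pts

-- ===== PORT B =====
def score_in_row_alt (row : List Int) : Int :=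
  let counts : PySem.Dict Int Int := row.foldl (fun d x => d.insert x (d.getD x 0 + 1)) PySem.Dict.empty
  let mult : PySem.Dict Int Int := counts.values.foldl (fun d c => d.insert c (d.getD c 0 + 1)) PySem.Dict.empty
  if mult.getD 2 0 = 2 then 3                                   -- 2 paire
  else if mult.getD 4 0 = 1 then 6                              -- carre
  else if mult.getD 5 0 = 1 then 8                              -- 5x
  else if mult.getD 3 0 = 1 ∧ mult.getD 2 0 = 1 then 6          -- full
  else if mult.getD 3 0 = 1 then 3                              -- brelan
  else if mult.getD 2 0 = 1 then 1                              -- paire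
  else if mult.getD 1 0 = 5 then
    match PySem.List.max? row (fun y => y) with
    | some mx =>
      match PySem.List.min? row (fun y => y) with
      | some mn =>
        if mx - mn = 4 then
          let inc := (row.zip row.tail).all (fun p => decide (p.1 < p.2))
          let dec := (row.zip row.tail).all (fun p => decide (p.1 > p.2))
          if inc || dec then 12 else 8
        else 0
      | none => 0
    | none => 0
  else 0

-- ===== PRECONDITION & SPEC =====
def Spec_score_in_row (row : List Int) (out : Int) : Prop := out = score_in_row_alt row
instance (row : List Int) (out : Int) : Decidable (Spec_score_in_row row out) := by unfold Spec_score_in_row; infer_instance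

-- ===== CLAIM (what is proved, stated in full; the proofs are below) =====
def Claim_equal_score_in_row : Prop := ∀ (row : List Int), Dom_score_in_row row → Spec_score_in_row row (score_in_row row)

-- ===== LEMMAS AND PROOFS =====

-- number of distinct values of row appearing exactly c times
def multOf (row : List Int) (c : Nat) : Nat :=
  (PySem.Set.ofList row).countP (fun x => List.count x row == c)

-- A's count-of-counts equals c * multOf row c
lemma countP_count_eq (row : List Int) (c : Nat) :
    row.countP (fun x => List.count x row == c) = c * multOf row c := by
  set p : Int → Bool := fun x => List.count x row == c with hp
  rw [← List.sum_map_count_dedup_filter_eq_countP p row]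
  have hperm : (row.dedup.filter p).Perm ((PySem.Set.ofList row).filter p) := by
    refine List.Perm.filter p ?_
    rw [List.perm_ext_iff_of_nodup (List.nodup_dedup row) (PySem.Set.nodup_ofList row)]
    intro a; simp [PySem.Set.mem_ofList]
  have hmem : ∀ v ∈ row.dedup.filter p, List.count v row = c := by
    intro v hv
    have := (List.mem_filter.mp hv).2
    simpa [hp] using this
  have hlen : (row.dedup.filter p).length = multOf row c := by
    rw [multOf, List.countP_eq_length_filter, ← hp]
    exact hperm.length_eq
  calc ((row.dedup.filter p).map (fun x => List.count x row)).sum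
      = ((row.dedup.filter p).map (fun _ => c)).sum := by
        exact congrArg List.sum (List.map_congr_left hmem)
    _ = (row.dedup.filter p).length * c := by
        simp [List.map_const', List.sum_replicate, smul_eq_mul]
    _ = c * multOf row c := by rw [hlen]; ring

lemma natCastInt_inj : Function.Injective (fun n : Nat => (n : Int)) :=
  fun a b h => by simpa using h

-- B's mult lookup equals multOf row c (as an Int)
lemma mult_getD_eq (row : List Int) (c : Nat) :
    ((row.foldl (fun d x => d.insert x (d.getD x 0 + 1)) PySem.Dict.empty).values.foldl
        (fun d x => d.insert x (d.getD x 0 + 1)) PySem.Dict.empty).getD (c : Int) 0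
      = (multOf row c : Int) := by
  rw [PySem.Dict.foldl_insert_getD_add_one_eq_counter,
      PySem.Dict.foldl_insert_getD_add_one_eq_counter,
      PySem.Dict.getD_counter]
  have hv : (PySem.Dict.counter row).values
      = (PySem.Set.ofList row).map (fun k => ((List.count k row : Nat) : Int)) := by
    rw [PySem.Dict.values_eq_map_keys _ (PySem.Dict.nodup_keys_counter row) 0,
        PySem.Dict.keys_counter]
    exact List.map_congr_left (fun k _ => PySem.Dict.getD_counter row k)
  rw [hv]
  have hmm : (PySem.Set.ofList row).map (fun k => ((List.count k row : Nat) : Int))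
      = ((PySem.Set.ofList row).map (fun k => List.count k row)).map (fun n : Nat => (n : Int)) := by
    rw [List.map_map]; rfl
  have hnat : List.count ((c : Nat) : Int)
      ((PySem.Set.ofList row).map (fun k => ((List.count k row : Nat) : Int))) = multOf row c := by
    rw [hmm, List.count_map_of_injective _ _ natCastInt_inj c,
        List.count_eq_countP, List.countP_map]
    rfl
  rw [hnat]

-- A's row_count list, and its counts, via multOf
lemma row_count_eq (row : List Int) :
    row.foldl (fun acc item => acc ++ [((PySem.List.count row item : Nat) : Int)]) []
      = row.map (fun item => ((List.count item row : Nat) : Int)) := by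
  rw [PySem.List.foldl_append_singleton_eq_map]
  simp [PySem.List.count_eq]

lemma A_count_eq (row : List Int) (c : Nat) :
    PySem.List.count (row.map (fun item => ((List.count item row : Nat) : Int))) ((c : Nat) : Int)
      = c * multOf row c := by
  rw [PySem.List.count_eq]
  have hmm : (row.map fun item => ((List.count item row : Nat) : Int))
      = (row.map (fun item => List.count item row)).map (fun n : Nat => (n : Int)) := by
    rw [List.map_map]; rfl
  rw [hmm, List.count_map_of_injective _ _ natCastInt_inj c,
      List.count_eq_countP, List.countP_map, ← countP_count_eq row c]
  rfl

-- strictly-increasing checks agree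
lemma inc_eq : ∀ (l : List Int),
    (l.zip l.tail).all (fun p => decide (p.1 < p.2)) = isSortedA l := by
  intro l
  induction l with
  | nil => rfl
  | cons a t ih =>
    cases t with
    | nil => rfl
    | cons b t' =>
      simp only [List.tail_cons] at ih ⊢
      simp only [List.zip_cons_cons, List.all_cons, isSortedA]
      rw [← ih]

lemma zipAll_eq_pairwise (R : Int → Int → Prop) [DecidableRel R] (ht : ∀ {a b c : Int}, R a b → R b c → R a c) :
    ∀ (l : List Int), (l.zip l.tail).all (fun p => decide (R p.1 p.2)) = decide (l.Pairwise R) := by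
  intro l
  induction l with
  | nil => simp
  | cons a t ih =>
    cases t with
    | nil => simp
    | cons b t' =>
      simp only [List.tail_cons] at ih ⊢
      simp only [List.zip_cons_cons, List.all_cons]
      rw [ih, ← Bool.decide_and, decide_eq_decide]
      constructor
      · rintro ⟨hab, hp⟩
        refine List.pairwise_cons.mpr ⟨?_, hp⟩
        intro x hx
        rcases List.mem_cons.mp hx with rfl | hx'
        · exact hab
        · exact ht hab ((List.pairwise_cons.mp hp).1 x hx')
      · intro h
        rcases List.pairwise_cons.mp h with ⟨hall, hp⟩
        exact ⟨hall b (List.mem_cons_self), hp⟩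

lemma dec_eq (l : List Int) :
    (l.zip l.tail).all (fun p => decide (p.1 > p.2)) = isSortedA l.reverse := by
  rw [← inc_eq l.reverse,
      zipAll_eq_pairwise (· < ·) (fun h1 h2 => lt_trans h1 h2) l.reverse,
      zipAll_eq_pairwise (· > ·) (fun h1 h2 => lt_trans h2 h1) l,
      decide_eq_decide, List.pairwise_reverse]

-- ===== VERDICT (by name: the statement is the Claim_ definition above) =====
theorem score_in_row_spec : Claim_equal_score_in_row := by
  intro row _
  unfold Spec_score_in_row score_in_row score_in_row_alt
  simp only [row_count_eq row]
  have h1 := A_count_eq row 1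
  have h2 := A_count_eq row 2
  have h3 := A_count_eq row 3
  have h4 := A_count_eq row 4
  have h5 := A_count_eq row 5
  have g1 := mult_getD_eq row 1
  have g2 := mult_getD_eq row 2
  have g3 := mult_getD_eq row 3
  have g4 := mult_getD_eq row 4
  have g5 := mult_getD_eq row 5
  simp only [Nat.cast_ofNat, Nat.cast_one] at h1 h2 h3 h4 h5 g1 g2 g3 g4 g5
  rw [h1, h2, h3, h4, h5, g1, g2, g3, g4, g5, inc_eq, dec_eq]
  have e2 : (2 * multOf row 2 = 4) ↔ ((multOf row 2 : Int) = 2) := by omega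
  have e4 : (4 * multOf row 4 = 4) ↔ ((multOf row 4 : Int) = 1) := by omega
  have e5 : (5 * multOf row 5 = 5) ↔ ((multOf row 5 : Int) = 1) := by omega
  have e3 : (3 * multOf row 3 = 3) ↔ ((multOf row 3 : Int) = 1) := by omega
  have e2' : (2 * multOf row 2 = 2) ↔ ((multOf row 2 : Int) = 1) := by omega
  have e1 : (1 * multOf row 1 = 5) ↔ ((multOf row 1 : Int) = 5) := by omega
  simp only [e2, e4, e5, e3, e2', e1]
  rcases PySem.List.max? row (fun y => y) with _ | mx <;>
    rcases PySem.List.min? row (fun y => y) with _ | mn <;> norm_num
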